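-- pv_equiv track=rewrite | github.com/kkobug/algorithm_study | programmers/고득점 KIT/힙/더 맵게.py | solution
-- ===== SOURCE A (Python) =====
-- from heapq import heappop, heappush, heapify
--
-- def solution(scoville, K):
--     answer = 0
--
--     def is_over_k(food_list, k):
--         low = heappop(food_list)
--         if k <= low:
--             return True # 가장 스코빌이 낮은 음식이 k보다 큼
--         heappush(food_list, low)
--         return False
--
--     heapify(scoville)
--
--     if is_over_k(scoville, K):
--         return answer
--
--     while 1 < len(scoville):
--         answer += 1
--         new_food = heappop(scoville)
--         new_food += 2*heappop(scoville)
--         heappush(scoville, new_food)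
--
--         if is_over_k(scoville, K):
--             return answer
--
--     if is_over_k(scoville, K):
--         return answer
--
--     answer = -1
--     return answer
-- ===== SOURCE B (Python) =====
-- def solution(scoville, K):
--     pot = sorted(scoville)
--     mixes = 0
--     while pot[0] < K:
--         if len(pot) < 2:
--             return -1
--         new = pot[0] + 2 * pot[1]
--         del pot[:2]
--         i = 0
--         while i < len(pot) and pot[i] <= new:
--             i += 1
--         pot.insert(i, new)
--         mixes += 1
--     return mixes
-- ===== Notes on version B (the rewrite author's own statement) =====
-- stated objective: alternative
-- what changed: Replaces the heap (heapify/heappop/heappush and the pop-test-push is_over_k helper) with a list sorted once up front and kept sorted by ordered insertion, with a single while-loop on the current minimum pot[0].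
import Mathlib
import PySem

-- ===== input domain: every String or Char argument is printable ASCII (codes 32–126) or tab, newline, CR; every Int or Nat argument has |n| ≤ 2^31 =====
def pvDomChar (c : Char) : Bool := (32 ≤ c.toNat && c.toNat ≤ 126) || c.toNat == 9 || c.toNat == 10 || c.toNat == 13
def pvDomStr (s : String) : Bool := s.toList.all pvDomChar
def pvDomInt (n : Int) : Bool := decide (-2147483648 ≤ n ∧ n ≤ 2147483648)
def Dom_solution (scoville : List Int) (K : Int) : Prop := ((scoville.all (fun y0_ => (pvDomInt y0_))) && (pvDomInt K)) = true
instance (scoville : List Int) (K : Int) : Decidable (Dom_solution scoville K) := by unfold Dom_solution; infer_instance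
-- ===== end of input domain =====

-- B replaces A's heap with a list sorted once and kept sorted by ordered insertion (alternative
-- decomposition, similar cost); equivalence is about the RETURN value only — A heapifies the
-- argument list in place, B leaves it untouched.

-- ===== PORT A =====
-- heappop of a heap returns its minimum element: ported as popMin (extract the minimum value,
-- remove one occurrence); heappush is ported as cons and heapify as the identity, since every
-- subsequent value A computes depends on the heap only through popMin (its multiset of elements).
def popMin : List Int → Int × List Int
  | [] => (0, [])            -- unreachable under Pre_solution (heappop on [] raises IndexError)
  | [x] => (x, [])
  | x :: y :: ys =>
      let p := popMin (y :: ys)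
      if x ≤ p.1 then (x, y :: ys) else (p.1, x :: p.2)

-- is_over_k: pop the lowest; if K ≤ low report True, else push low back and report False
def isOverK (l : List Int) (k : Int) : Bool × List Int :=
  if k ≤ (popMin l).1 then (true, (popMin l).2) else (false, (popMin l).1 :: (popMin l).2)

lemma popMin_snd_length : ∀ (x : Int) (t : List Int), ((popMin (x :: t)).2).length = t.length := by
  intro x t
  induction t generalizing x with
  | nil => simp [popMin]
  | cons y ys ih =>
      simp only [popMin]
      split
      · rfl
      · simpa using ih y

lemma isOverK_snd_length_le (x : Int) (t : List Int) (k : Int) :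
    ((isOverK (x :: t) k).2).length ≤ t.length + 1 := by
  simp only [isOverK]
  split <;> simp [popMin_snd_length]

def loopA (l : List Int) (K : Int) (ans : Int) : Int :=
  if h : 1 < l.length then
    let a := (popMin l).1
    let l1 := (popMin l).2
    let b := (popMin l1).1
    let l2 := (popMin l1).2
    let p := isOverK ((a + 2 * b) :: l2) K
    if p.1 then ans + 1 else loopA p.2 K (ans + 1)
  else if (isOverK l K).1 then ans else -1
termination_by l.length
decreasing_by
  match l, h with
  | x :: y :: ys, _ =>
    have h1 := popMin_snd_length x (y :: ys)
    match hm : (popMin (x :: y :: ys)).2 with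
    | [] => simp [hm] at h1
    | z :: zs =>
      have h2 := popMin_snd_length z zs
      have h3 := isOverK_snd_length_le
        ((popMin (x :: y :: ys)).1 + 2 * (popMin (z :: zs)).1) ((popMin (z :: zs)).2) K
      simp only [hm] at *
      simp only [List.length_cons] at *
      omega

def solution (scoville : List Int) (K : Int) : Int :=
  let p := isOverK scoville K
  if p.1 then 0 else loopA p.2 K 0

-- ===== PORT B =====
-- the hand-written ordered insertion of Source B (scan past elements ≤ new, insert there)
def insortB (x : Int) : List Int → List Int
  | [] => [x]
  | y :: ys => if y ≤ x then y :: insortB x ys else x :: y :: ys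

lemma insortB_length : ∀ (x : Int) (s : List Int), (insortB x s).length = s.length + 1 := by
  intro x s
  induction s with
  | nil => rfl
  | cons y ys ih => simp only [insortB]; split <;> simp [ih]

def loopB (pot : List Int) (K : Int) (mixes : Int) : Int :=
  match pot with
  | [] => mixes              -- unreachable under Pre_solution (pot[0] on [] raises IndexError)
  | [a] => if a < K then -1 else mixes
  | a :: b :: rest => if a < K then loopB (insortB (a + 2 * b) rest) K (mixes + 1) else mixes
termination_by pot.length
decreasing_by simp [insortB_length]

def solution_alt (scoville : List Int) (K : Int) : Int :=
  loopB (PySem.List.sorted scoville (fun x => x) false) K 0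

-- ===== PRECONDITION & SPEC =====
-- Pre_ excludes only the empty list, on which A's first heappop raises IndexError (B's pot[0] raises too).
def Pre_solution (scoville : List Int) (K : Int) : Prop := scoville ≠ []
instance (scoville : List Int) (K : Int) : Decidable (Pre_solution scoville K) := by unfold Pre_solution; infer_instance
def pvWitness_solution : List Int × Int := ([1, 2, 3, 9, 10, 12], 7)
def Spec_solution (scoville : List Int) (K : Int) (out : Int) : Prop := out = solution_alt scoville K
instance (scoville : List Int) (K : Int) (out : Int) : Decidable (Spec_solution scoville K out) := by unfold Spec_solution; infer_instance

-- ===== CLAIM (what is proved, stated in full; the proofs are below) =====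
def Claim_equal_solution : Prop := ∀ (scoville : List Int) (K : Int), Dom_solution scoville K → Pre_solution scoville K → Spec_solution scoville K (solution scoville K)

-- ===== LEMMAS AND PROOFS =====

lemma popMin_perm : ∀ (x : Int) (t : List Int),
    (x :: t).Perm ((popMin (x :: t)).1 :: (popMin (x :: t)).2) := by
  intro x t
  induction t generalizing x with
  | nil => simp [popMin]
  | cons y ys ih =>
      simp only [popMin]
      split
      · exact List.Perm.refl _
      · exact ((ih y).cons x).trans (List.Perm.swap _ _ _)

lemma popMin_isMin : ∀ (x : Int) (t : List Int), ∀ z ∈ x :: t, (popMin (x :: t)).1 ≤ z := by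
  intro x t
  induction t generalizing x with
  | nil => simp [popMin]
  | cons y ys ih =>
      intro z hz
      simp only [popMin]
      rcases List.mem_cons.mp hz with rfl | hz'
      · split
        · exact le_refl _
        · next h => exact le_of_lt (lt_of_not_ge h)
      · have hmin := ih y z hz'
        split
        · next h => exact le_trans h hmin
        · exact hmin

-- characterisation of popMin on a list permuting a sorted cons
lemma popMin_char (x : Int) (t : List Int) (a : Int) (tl : List Int)
    (hperm : (x :: t).Perm (a :: tl)) (hsort : (x :: t).Pairwise (· ≤ ·)) :
    (popMin (a :: tl)).1 = x ∧ t.Perm (popMin (a :: tl)).2 := by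
  have hp := popMin_perm a tl
  have hm_mem : (popMin (a :: tl)).1 ∈ (x :: t) := by
    apply hperm.mem_iff.mpr
    exact hp.symm.subset (List.mem_cons_self ..)
  have hx_le : x ≤ (popMin (a :: tl)).1 := by
    rcases List.mem_cons.mp hm_mem with h | h
    · exact le_of_eq h.symm
    · exact (List.pairwise_cons.mp hsort).1 _ h
  have hle_x : (popMin (a :: tl)).1 ≤ x :=
    popMin_isMin a tl x (hperm.subset (List.mem_cons_self ..))
  have heq : (popMin (a :: tl)).1 = x := le_antisymm hle_x hx_le
  refine ⟨heq, ?_⟩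
  have : (x :: t).Perm ((popMin (a :: tl)).1 :: (popMin (a :: tl)).2) := hperm.trans hp
  rw [heq] at this
  exact this.cons_inv

lemma insortB_perm : ∀ (x : Int) (s : List Int), (insortB x s).Perm (x :: s) := by
  intro x s
  induction s with
  | nil => rfl
  | cons y ys ih =>
      simp only [insortB]
      split
      · exact (ih.cons y).trans (List.Perm.swap _ _ _)
      · exact List.Perm.refl _

lemma insortB_sorted : ∀ (x : Int) (s : List Int),
    s.Pairwise (· ≤ ·) → (insortB x s).Pairwise (· ≤ ·) := by
  intro x s hs
  induction s with
  | nil => simp [insortB]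
  | cons y ys ih =>
      rcases List.pairwise_cons.mp hs with ⟨hy, hys⟩
      simp only [insortB]
      split
      · next hyx =>
          refine List.pairwise_cons.mpr ⟨?_, ih hys⟩
          intro z hz
          rcases List.mem_cons.mp ((insortB_perm x ys).subset hz) with rfl | h
          · exact hyx
          · exact hy _ h
      · next hyx =>
          refine List.pairwise_cons.mpr ⟨?_, hs⟩
          intro z hz
          have hxy : x ≤ y := le_of_lt (lt_of_not_ge hyx)
          rcases List.mem_cons.mp hz with rfl | h
          · exact hxy
          · exact le_trans hxy (hy _ h)

-- main loop equivalence: if s = x :: s' is a sorted permutation of A's heap contents l and the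
-- current minimum x is still below K, A's heap loop and B's sorted-list loop agree.
lemma loop_eq : ∀ (n : Nat) (l : List Int) (x : Int) (s' : List Int) (K ans : Int),
    l.length ≤ n → (x :: s').Perm l → (x :: s').Pairwise (· ≤ ·) → x < K →
    loopA l K ans = loopB (x :: s') K ans := by
  intro n
  induction n with
  | zero =>
      intro l x s' K ans hlen hperm _ _
      have := hperm.length_eq
      simp at this
      omega
  | succ n ih =>
      intro l x s' K ans hlen hperm hsort hxK
      match s' with
      | [] =>
          have hl : l = [x] := by
            have := hperm.symm
            rwa [List.perm_singleton] at this
          subst hl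
          rw [loopA]
          simp only [List.length_cons, List.length_nil]
          rw [dif_neg (by simp)]
          simp [isOverK, popMin, loopB, not_le.mpr hxK, hxK]
      | b :: s'' =>
          -- l has at least two elements
          have hlen2 : l.length = s''.length + 2 := by
            have := hperm.length_eq; simpa using this.symm
          match l, hlen2 with
          | a :: tl, hlen2' =>
            have hc1 := popMin_char x (b :: s'') a tl hperm hsort
            have hsort' : (b :: s'').Pairwise (· ≤ ·) := (List.pairwise_cons.mp hsort).2
            -- second pop
            have hl1len : (popMin (a :: tl)).2.length = s''.length + 1 := by
              have := hc1.2.length_eq; simpa using this.symm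
            match hl1 : (popMin (a :: tl)).2, hl1len with
            | a2 :: tl2, hl1len' =>
              have hc2 := popMin_char b s'' a2 tl2 (by rw [← hl1]; exact hc1.2) hsort'
              -- state after pushing the new food
              set new := x + 2 * b with hnew
              have hperm3 : (insortB new s'').Perm (new :: (popMin (a2 :: tl2)).2) :=
                (insortB_perm new s'').trans ((hc2.2).cons new)
              have hsort3 : (insortB new s'').Pairwise (· ≤ ·) :=
                insortB_sorted new s'' (List.pairwise_cons.mp hsort').2
              have hlen3 : (insortB new s'').length = s''.length + 1 := by
                rw [insortB_length]
              match ht : insortB new s'', hlen3 with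
              | m :: t', hlen3' =>
                have hperm3' : (m :: t').Perm (new :: (popMin (a2 :: tl2)).2) := by
                  rw [← ht]; exact hperm3
                have hsort3' : (m :: t').Pairwise (· ≤ ·) := by rw [← ht]; exact hsort3
                have hc3 := popMin_char m t' new (popMin (a2 :: tl2)).2 hperm3' hsort3'
                -- unfold one step of loopA
                rw [loopA]
                rw [dif_pos (by rw [hlen2']; omega)]
                simp only [hl1, hc1.1, hc2.1, ← hnew, isOverK, hc3.1]
                -- unfold one step of loopB
                show _ = loopB (x :: b :: s'') K ans
                rw [loopB, if_pos hxK, ht]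
                by_cases hK : K ≤ m
                · rw [if_pos (by simp [hK])]
                  match t' with
                  | [] => simp [loopB, not_lt.mpr hK]
                  | c :: cs => simp [loopB, not_lt.mpr hK]
                · rw [if_neg hK]
                  rw [if_neg (by simp)]
                  show loopA (m :: (popMin (new :: (popMin (a2 :: tl2)).2)).2) K (ans + 1) =
                    loopB (m :: t') K (ans + 1)
                  apply ih
                  · have e1 := hc3.2.length_eq
                    simp only [List.length_cons] at *
                    omega
                  · exact hc3.2.cons m
                  · exact hsort3'
                  · exact lt_of_not_ge hK

-- the sorted list used by B is a sorted permutation of the input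
lemma sorted_spec (l : List Int) :
    (PySem.List.sorted l (fun x => x) false).Perm l ∧
    (PySem.List.sorted l (fun x => x) false).Pairwise (· ≤ ·) := by
  refine ⟨PySem.List.sorted_perm .., ?_⟩
  have := PySem.List.sorted_pairwise (xs := l) (key := fun x => x)
  simpa using this

-- ===== VERDICT (by name: the statement is the Claim_ definition above) =====
theorem solution_spec : Claim_equal_solution := by
  intro scoville K _hdom hpre
  unfold Spec_solution solution solution_alt
  obtain ⟨hperm, hsort⟩ := sorted_spec scoville
  match hs : PySem.List.sorted scoville (fun x => x) false with
  | [] =>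
      exfalso
      have := hperm.length_eq
      rw [hs] at this
      exact hpre (List.eq_nil_of_length_eq_zero this.symm)
  | x :: s' =>
      rw [hs] at hperm hsort
      match hsc : scoville with
      | [] => exact absurd rfl hpre
      | a :: tl =>
        have hc := popMin_char x s' a tl hperm hsort
        simp only [isOverK, hc.1]
        by_cases hK : K ≤ x
        · rw [if_pos (by simp [hK])]
          match s' with
          | [] => simp [loopB, not_lt.mpr hK]
          | c :: cs => simp [loopB, not_lt.mpr hK]
        · rw [if_neg hK]
          rw [if_neg (by simp)]
          exact loop_eq ((popMin (a :: tl)).2.length + 1) _ x s' K 0 (by simp)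
            (hc.2.cons x) hsort (lt_of_not_ge hK)
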